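-- pv_equiv track=rewrite | github.com/MarcusVukojevic/spectral | Fourier/fft_img3.py | find_max_coordinates
-- ===== SOURCE A (Python) =====
-- def find_max_coordinates(image, x, y, window_size):
--
--     half_window = window_size // 2
--     max_val = None
--     max_coordinates = []
--
--     for i in range(x - half_window, x + half_window + 1):
--         for j in range(y - half_window, y + half_window + 1):
--             if 0 <= i < len(image) and 0 <= j < len(image[0]):
--                 if max_val is None or image[i][j] > max_val:
--                     max_val = image[i][j]
--                     max_coordinates = [(i, j, max_val)]
--                 elif image[i][j] == max_val:
--                     max_coordinates.append((i, j, max_val))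
--     return max_coordinates
-- ===== SOURCE B (Python) =====
-- def find_max_coordinates(image, x, y, window_size):
--     half = window_size // 2
--     rows = len(image)
--     cols = len(image[0]) if image else 0
--     i_lo, i_hi = max(x - half, 0), min(x + half, rows - 1)
--     j_lo, j_hi = max(y - half, 0), min(y + half, cols - 1)
--
--     max_val = None
--     for i in range(i_lo, i_hi + 1):
--         for j in range(j_lo, j_hi + 1):
--             v = image[i][j]
--             if max_val is None or v > max_val:
--                 max_val = v
--     if max_val is None:
--         return []
--     return [(i, j, max_val)
--             for i in range(i_lo, i_hi + 1)
--             for j in range(j_lo, j_hi + 1)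
--             if image[i][j] == max_val]
-- ===== Notes on version B (the rewrite author's own statement) =====
-- stated objective: faster
-- what changed: Replaced A's single fused scan over the full unclamped window with a per-cell bounds test by two passes over the window clamped to the image once: a max-finding pass, then a comprehension collecting the cells equal to the max.
import Mathlib
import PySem

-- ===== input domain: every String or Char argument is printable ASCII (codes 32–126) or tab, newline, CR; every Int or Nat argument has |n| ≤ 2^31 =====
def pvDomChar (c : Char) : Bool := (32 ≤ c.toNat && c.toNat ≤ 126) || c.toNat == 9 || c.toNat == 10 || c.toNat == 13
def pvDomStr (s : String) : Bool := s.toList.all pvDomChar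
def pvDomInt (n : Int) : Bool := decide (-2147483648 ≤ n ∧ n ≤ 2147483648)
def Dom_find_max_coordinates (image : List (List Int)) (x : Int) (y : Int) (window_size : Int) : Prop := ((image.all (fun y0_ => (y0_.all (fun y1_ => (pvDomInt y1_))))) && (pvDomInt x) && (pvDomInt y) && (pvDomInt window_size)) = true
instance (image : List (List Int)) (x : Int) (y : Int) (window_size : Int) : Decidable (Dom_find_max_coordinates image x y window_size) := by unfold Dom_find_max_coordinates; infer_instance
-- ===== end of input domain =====

-- B clamps the window to the image once and splits A's fused scan into a max pass plus a
-- collect pass; faster because A iterates the full window_size^2 range even far outside the image.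
-- ===== PORT A =====
def find_max_coordinates (image : List (List Int)) (x : Int) (y : Int) (window_size : Int) : List (Int × Int × Int) :=
  -- literal port of A: fused scan over the full (unclamped) window with per-cell bounds test;
  -- image[i][j] is read only under 0 ≤ i < len(image), 0 ≤ j < len(image[0]) (exact there given Pre_)
  let half := PySem.Int.floordiv window_size 2
  let st := (PySem.List.pyRange (x - half) (x + half + 1) 1).foldl (fun s i =>
      (PySem.List.pyRange (y - half) (y + half + 1) 1).foldl (fun (s : Option Int × List (Int × Int × Int)) j =>
        if 0 ≤ i ∧ i < (image.length : Int) ∧ 0 ≤ j ∧ j < ((image.headD []).length : Int) then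
          let v := PySem.List.pyGetD (PySem.List.pyGetD image i []) j 0
          match s.1 with
          | none => (some v, [(i, j, v)])
          | some m => if m < v then (some v, [(i, j, v)])
                      else if v = m then (s.1, s.2 ++ [(i, j, v)])
                      else s
        else s) s)
    ((none : Option Int), ([] : List (Int × Int × Int)))
  st.2


-- ===== PORT B =====
def find_max_coordinates_alt (image : List (List Int)) (x : Int) (y : Int) (window_size : Int) : List (Int × Int × Int) :=
  -- port of B: clamp the window once, find the maximum in a first pass, then collect equal cells
  let half := PySem.Int.floordiv window_size 2
  let rows : Int := image.length
  let cols : Int := match image with | [] => 0 | r :: _ => r.length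
  let ilo := max (x - half) 0
  let ihi := min (x + half) (rows - 1)
  let jlo := max (y - half) 0
  let jhi := min (y + half) (cols - 1)
  let mo := (PySem.List.pyRange ilo (ihi + 1) 1).foldl (fun mo i =>
      (PySem.List.pyRange jlo (jhi + 1) 1).foldl (fun (mo : Option Int) j =>
        let v := PySem.List.pyGetD (PySem.List.pyGetD image i []) j 0
        match mo with
        | none => some v
        | some m => if m < v then some v else mo) mo) none
  match mo with
  | none => []
  | some m => (PySem.List.pyRange ilo (ihi + 1) 1).flatMap (fun i =>
      (PySem.List.pyRange jlo (jhi + 1) 1).filterMap (fun j =>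
        if PySem.List.pyGetD (PySem.List.pyGetD image i []) j 0 = m then some (i, j, m) else none))


-- ===== PRECONDITION & SPEC =====
-- Pre_ excludes ragged images on which Python A raises IndexError: a scanned in-bounds row i
-- shorter than the scanned j-range bound len(image[0]) makes image[i][j] raise. On rectangular
-- images (and whenever the window misses the short rows) Pre_ holds.
def Pre_find_max_coordinates (image : List (List Int)) (x : Int) (y : Int) (window_size : Int) : Prop :=
  let half := PySem.Int.floordiv window_size 2
  let cols : Int := (image.headD []).length
  ∀ i ∈ List.range image.length,
    (x - half ≤ (i : Int) ∧ (i : Int) ≤ x + half ∧ max (y - half) 0 ≤ min (y + half) (cols - 1)) →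
    min (y + half) (cols - 1) < ((image.getD i []).length : Int)
instance (image : List (List Int)) (x : Int) (y : Int) (window_size : Int) : Decidable (Pre_find_max_coordinates image x y window_size) := by unfold Pre_find_max_coordinates; infer_instance

def pvWitness_find_max_coordinates : List (List Int) × Int × Int × Int := ([[1, 2], [3, 4]], 0, 1, 3)
def Spec_find_max_coordinates (image : List (List Int)) (x : Int) (y : Int) (window_size : Int) (out : List (Int × Int × Int)) : Prop := out = find_max_coordinates_alt image x y window_size
instance (image : List (List Int)) (x : Int) (y : Int) (window_size : Int) (out : List (Int × Int × Int)) : Decidable (Spec_find_max_coordinates image x y window_size out) := by unfold Spec_find_max_coordinates; infer_instance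

-- ===== CLAIM (what is proved, stated in full; the proofs are below) =====
def Claim_equal_find_max_coordinates : Prop := ∀ (image : List (List Int)) (x : Int) (y : Int) (window_size : Int), Dom_find_max_coordinates image x y window_size → Pre_find_max_coordinates image x y window_size → Spec_find_max_coordinates image x y window_size (find_max_coordinates image x y window_size)

-- ===== LEMMAS AND PROOFS =====

-- the cell value both ports read at (i, j)
def pvVal (image : List (List Int)) (i j : Int) : Int :=
  PySem.List.pyGetD (PySem.List.pyGetD image i []) j 0

-- A's loop body on a flattened cell
def pvStepA (s : Option Int × List (Int × Int × Int)) (c : Int × Int × Int) :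
    Option Int × List (Int × Int × Int) :=
  match s.1 with
  | none => (some c.2.2, [c])
  | some m => if m < c.2.2 then (some c.2.2, [c])
              else if c.2.2 = m then (s.1, s.2 ++ [c])
              else s

-- B's max-pass body on a flattened cell
def pvStepM (mo : Option Int) (v : Int) : Option Int :=
  match mo with
  | none => some v
  | some m => if m < v then some v else mo

theorem pv_foldl_filterMap {α β γ : Type} (l : List α) (f : α → Option β) (g : γ → β → γ) (s : γ) :
    (l.filterMap f).foldl g s = l.foldl (fun s a => match f a with | some b => g s b | none => s) s := by
  induction l generalizing s with
  | nil => rfl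
  | cons a l ih =>
      cases h : f a <;> simp [h, ih]

-- a filterMap with a clamped guard over a unit range is the map over the clamped range
theorem pv_filterMap_if_pyRange {α : Type} (n : Nat) (a b lo hi : Int) (hn : (b - a).toNat = n)
    (f : Int → α) :
    (PySem.List.pyRange a b 1).filterMap
        (fun j => if lo ≤ j ∧ j < hi then some (f j) else none)
      = (PySem.List.pyRange (max a lo) (min b hi) 1).map f := by
  induction n generalizing a with
  | zero =>
      have hba : b ≤ a := by omega
      rw [PySem.List.pyRange_one_eq_nil hba, PySem.List.pyRange_one_eq_nil (by omega)]
      rfl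
  | succ n ih =>
      have hab : a < b := by omega
      rw [PySem.List.pyRange_one_cons hab]
      by_cases hc : lo ≤ a ∧ a < hi
      · have h1 : max a lo = a := by omega
        have h2 : max (a + 1) lo = a + 1 := by omega
        have h3 : a < min b hi := by omega
        simp only [List.filterMap_cons, if_pos hc, ih (a + 1) (by omega), h2, h1,
          PySem.List.pyRange_one_cons h3, List.map_cons]
      · rcases not_and_or.mp hc with h | h
        · push Not at h
          have h2 : max (a + 1) lo = max a lo := by omega
          simp only [List.filterMap_cons, if_neg hc, ih (a + 1) (by omega), h2]
        · push Not at h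
          rw [List.filterMap_cons, if_neg hc, ih (a + 1) (by omega),
            PySem.List.pyRange_one_eq_nil (by omega), PySem.List.pyRange_one_eq_nil (by omega)]

-- same clamping for a flatMap whose body is empty outside the guard
theorem pv_flatMap_if_pyRange {α : Type} (n : Nat) (a b lo hi : Int) (hn : (b - a).toNat = n)
    (f : Int → List α) :
    (PySem.List.pyRange a b 1).flatMap (fun i => if lo ≤ i ∧ i < hi then f i else [])
      = (PySem.List.pyRange (max a lo) (min b hi) 1).flatMap f := by
  induction n generalizing a with
  | zero =>
      have hba : b ≤ a := by omega
      rw [PySem.List.pyRange_one_eq_nil hba, PySem.List.pyRange_one_eq_nil (by omega)]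
      rfl
  | succ n ih =>
      have hab : a < b := by omega
      rw [PySem.List.pyRange_one_cons hab]
      by_cases hc : lo ≤ a ∧ a < hi
      · have h1 : max a lo = a := by omega
        have h2 : max (a + 1) lo = a + 1 := by omega
        have h3 : a < min b hi := by omega
        simp only [List.flatMap_cons, if_pos hc, ih (a + 1) (by omega), h2, h1,
          PySem.List.pyRange_one_cons h3]
      · rcases not_and_or.mp hc with h | h
        · push Not at h
          have h2 : max (a + 1) lo = max a lo := by omega
          simp only [List.flatMap_cons, if_neg hc, ih (a + 1) (by omega), h2, List.nil_append]
        · push Not at h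
          rw [List.flatMap_cons, if_neg hc, ih (a + 1) (by omega),
            PySem.List.pyRange_one_eq_nil (by omega), PySem.List.pyRange_one_eq_nil (by omega)]
          rfl

theorem pv_stepM_some (L : List (Int × Int × Int)) (m : Int) :
    L.foldl (fun mo c => pvStepM mo c.2.2) (some m) = some (L.foldl (fun a c => max a c.2.2) m) := by
  induction L generalizing m with
  | nil => rfl
  | cons c L ih =>
      rw [List.foldl_cons, List.foldl_cons]
      have hstep : pvStepM (some m) c.2.2 = some (max m c.2.2) := by
        show (if m < c.2.2 then some c.2.2 else some m) = some (max m c.2.2)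
        split_ifs with h
        · congr 1; omega
        · congr 1; omega
      rw [hstep, ih]

-- invariant of A's fused scan: state = (running max, all processed cells achieving it)
theorem pv_invA (L : List (Int × Int × Int)) (m : Int) (P : List (Int × Int × Int))
    (hP : ∀ c ∈ P, c.2.2 ≤ m) :
    L.foldl pvStepA (some m, P.filter (fun c => c.2.2 == m))
      = (some (L.foldl (fun a c => max a c.2.2) m),
         (P ++ L).filter (fun c => c.2.2 == L.foldl (fun a c => max a c.2.2) m)) := by
  induction L generalizing m P with
  | nil => simp
  | cons c L ih =>
      simp only [List.foldl_cons, pvStepA]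
      by_cases h1 : m < c.2.2
      · have e1 : [c] = (P ++ [c]).filter (fun d => d.2.2 == c.2.2) := by
          rw [List.filter_append]
          have : P.filter (fun d => d.2.2 == c.2.2) = [] := by
            apply List.filter_eq_nil_iff.mpr
            intro d hd
            have := hP d hd
            simp; omega
          simp [this]
        rw [if_pos h1, e1, ih c.2.2 (P ++ [c]) (by
          intro d hd
          rcases List.mem_append.mp hd with h | h
          · have := hP d h; omega
          · simp at h; subst h; omega)]
        have hm : max m c.2.2 = c.2.2 := by omega
        simp [hm, List.append_assoc]
      · rw [if_neg h1]
        by_cases h2 : c.2.2 = m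
        · have e1 : P.filter (fun d => d.2.2 == m) ++ [c] = (P ++ [c]).filter (fun d => d.2.2 == m) := by
            rw [List.filter_append]
            simp [h2]
          rw [if_pos h2, e1, ih m (P ++ [c]) (by
            intro d hd
            rcases List.mem_append.mp hd with h | h
            · exact hP d h
            · simp at h; subst h; omega)]
          have hm : max m c.2.2 = m := by omega
          simp [hm, List.append_assoc]
        · have e1 : P.filter (fun d => d.2.2 == m) = (P ++ [c]).filter (fun d => d.2.2 == m) := by
            rw [List.filter_append]
            simp [h2]
          rw [if_neg h2, e1, ih m (P ++ [c]) (by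
            intro d hd
            rcases List.mem_append.mp hd with h | h
            · exact hP d h
            · simp at h; subst h; omega)]
          have hm : max m c.2.2 = m := by omega
          simp [hm, List.append_assoc]

-- B's per-row collection pass is the filter of the row's cells
theorem pv_row_collect (image : List (List Int)) (i M : Int) (js : List Int) :
    js.filterMap (fun j => if pvVal image i j = M then some (i, j, M) else none)
      = ((js.map (fun j => (i, j, pvVal image i j))).filter (fun c => c.2.2 == M)) := by
  induction js with
  | nil => rfl
  | cons j js ih =>
      by_cases h : pvVal image i j = M
      · simp [h, ih]
      · simp [h, ih]


-- flattening A's fused nested loop into a fold of pvStepA over the guarded cell list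
theorem pv_A_as_flat (image : List (List Int)) (a b c d rows cols : Int)
    (init : Option Int × List (Int × Int × Int)) :
    (PySem.List.pyRange a b 1).foldl (fun s i =>
        (PySem.List.pyRange c d 1).foldl (fun (s : Option Int × List (Int × Int × Int)) j =>
          if 0 ≤ i ∧ i < rows ∧ 0 ≤ j ∧ j < cols then
            match s.1 with
            | none => (some (PySem.List.pyGetD (PySem.List.pyGetD image i []) j 0), [(i, j, PySem.List.pyGetD (PySem.List.pyGetD image i []) j 0)])
            | some m => if m < PySem.List.pyGetD (PySem.List.pyGetD image i []) j 0 then (some (PySem.List.pyGetD (PySem.List.pyGetD image i []) j 0), [(i, j, PySem.List.pyGetD (PySem.List.pyGetD image i []) j 0)])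
                        else if PySem.List.pyGetD (PySem.List.pyGetD image i []) j 0 = m then (s.1, s.2 ++ [(i, j, PySem.List.pyGetD (PySem.List.pyGetD image i []) j 0)])
                        else s
          else s) s) init
      = (((PySem.List.pyRange a b 1).flatMap (fun i =>
          (PySem.List.pyRange c d 1).filterMap (fun j =>
            if 0 ≤ i ∧ i < rows ∧ 0 ≤ j ∧ j < cols then some (i, j, pvVal image i j) else none))).foldl
            pvStepA init) := by
  rw [List.foldl_flatMap]
  congr 1
  funext s i
  rw [pv_foldl_filterMap]
  congr 1
  funext s j
  by_cases hc : 0 ≤ i ∧ i < rows ∧ 0 ≤ j ∧ j < cols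
  · simp only [if_pos hc]; rfl
  · simp only [if_neg hc]

-- the guarded cell list over the full window is the plain cell list over the clamped window
theorem pv_LA_eq (image : List (List Int)) (a b c d rows cols : Int) :
    ((PySem.List.pyRange a b 1).flatMap (fun i =>
        (PySem.List.pyRange c d 1).filterMap (fun j =>
          if 0 ≤ i ∧ i < rows ∧ 0 ≤ j ∧ j < cols then some (i, j, pvVal image i j) else none)))
      = (PySem.List.pyRange (max a 0) (min b rows) 1).flatMap (fun i =>
          (PySem.List.pyRange (max c 0) (min d cols) 1).map (fun j => (i, j, pvVal image i j))) := by
  have h1 : ∀ i : Int,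
      (PySem.List.pyRange c d 1).filterMap (fun j =>
          if 0 ≤ i ∧ i < rows ∧ 0 ≤ j ∧ j < cols then some (i, j, pvVal image i j) else none)
        = if 0 ≤ i ∧ i < rows then
            (PySem.List.pyRange (max c 0) (min d cols) 1).map (fun j => (i, j, pvVal image i j))
          else [] := by
    intro i
    by_cases hi : 0 ≤ i ∧ i < rows
    · rw [if_pos hi, ← pv_filterMap_if_pyRange (d - c).toNat c d 0 cols rfl]
      congr 1
      funext j
      by_cases hj : 0 ≤ j ∧ j < cols
      · rw [if_pos (by tauto), if_pos hj]
      · rw [if_neg (by tauto), if_neg hj]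
    · rw [if_neg hi]
      apply List.filterMap_eq_nil_iff.mpr
      intro j hj
      rw [if_neg (by tauto)]
  simp only [h1]
  exact pv_flatMap_if_pyRange (b - a).toNat a b 0 rows rfl _

-- flattening B's max pass into a fold of pvStepM over the cell list
theorem pv_B_max_flat (image : List (List Int)) (a b c d : Int) (init : Option Int) :
    (PySem.List.pyRange a b 1).foldl (fun mo i =>
        (PySem.List.pyRange c d 1).foldl (fun (mo : Option Int) j =>
          match mo with
          | none => some (PySem.List.pyGetD (PySem.List.pyGetD image i []) j 0)
          | some m => if m < PySem.List.pyGetD (PySem.List.pyGetD image i []) j 0 then some (PySem.List.pyGetD (PySem.List.pyGetD image i []) j 0) else mo) mo) init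
      = (((PySem.List.pyRange a b 1).flatMap (fun i =>
          (PySem.List.pyRange c d 1).map (fun j => (i, j, pvVal image i j)))).foldl
            (fun mo c => pvStepM mo c.2.2) init) := by
  rw [List.foldl_flatMap]
  congr 1
  funext mo i
  rw [List.foldl_map]
  rfl

-- B's collection pass is the filter of the cell list by the maximum
theorem pv_B_collect (image : List (List Int)) (a b c d M : Int) :
    (PySem.List.pyRange a b 1).flatMap (fun i =>
        (PySem.List.pyRange c d 1).filterMap (fun j =>
          if PySem.List.pyGetD (PySem.List.pyGetD image i []) j 0 = M then some (i, j, M) else none))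
      = ((PySem.List.pyRange a b 1).flatMap (fun i =>
          (PySem.List.pyRange c d 1).map (fun j => (i, j, pvVal image i j)))).filter
            (fun cc => cc.2.2 == M) := by
  rw [List.filter_flatMap]
  congr 1
  funext i
  exact pv_row_collect image i M _

-- the two ports agree on EVERY input (both read out-of-range cells through getD's default)
theorem pv_ports_eq (image : List (List Int)) (x : Int) (y : Int) (window_size : Int) :
    find_max_coordinates image x y window_size = find_max_coordinates_alt image x y window_size := by
  unfold find_max_coordinates find_max_coordinates_alt
  have hcols : (match image with | [] => (0 : Int) | r :: _ => (r.length : Int))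
      = ((image.headD []).length : Int) := by cases image <;> simp
  simp only [hcols]
  rw [pv_A_as_flat image (x - PySem.Int.floordiv window_size 2) (x + PySem.Int.floordiv window_size 2 + 1)
        (y - PySem.Int.floordiv window_size 2) (y + PySem.Int.floordiv window_size 2 + 1)
        (image.length : Int) ((image.headD []).length : Int) (none, []),
      pv_LA_eq,
      pv_B_max_flat image (max (x - PySem.Int.floordiv window_size 2) 0)
        (min (x + PySem.Int.floordiv window_size 2) ((image.length : Int) - 1) + 1)
        (max (y - PySem.Int.floordiv window_size 2) 0)
        (min (y + PySem.Int.floordiv window_size 2) (((image.headD []).length : Int) - 1) + 1) none]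
  have e1 : min (x + PySem.Int.floordiv window_size 2 + 1) (image.length : Int)
      = min (x + PySem.Int.floordiv window_size 2) ((image.length : Int) - 1) + 1 := by omega
  have e2 : min (y + PySem.Int.floordiv window_size 2 + 1) ((image.headD []).length : Int)
      = min (y + PySem.Int.floordiv window_size 2) (((image.headD []).length : Int) - 1) + 1 := by omega
  rw [e1, e2]
  generalize hL : (PySem.List.pyRange (max (x - PySem.Int.floordiv window_size 2) 0)
      (min (x + PySem.Int.floordiv window_size 2) ((image.length : Int) - 1) + 1) 1).flatMap
        (fun i => (PySem.List.pyRange (max (y - PySem.Int.floordiv window_size 2) 0)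
          (min (y + PySem.Int.floordiv window_size 2) (((image.headD []).length : Int) - 1) + 1) 1).map
            (fun j => (i, j, pvVal image i j))) = L
  cases L with
  | nil => rfl
  | cons c0 L' =>
      rw [show List.foldl (fun mo c => pvStepM mo c.2.2) none (c0 :: L')
            = some (L'.foldl (fun a c => max a c.2.2) c0.2.2) from by
          rw [List.foldl_cons]; exact pv_stepM_some L' c0.2.2]
      simp only []
      rw [pv_B_collect, hL, List.foldl_cons]
      have h0 : pvStepA (none, ([] : List (Int × Int × Int))) c0
          = (some c0.2.2, [c0].filter (fun d => d.2.2 == c0.2.2)) := by simp [pvStepA]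
      rw [h0, pv_invA L' c0.2.2 [c0] (by intro d hd; simp at hd; subst hd; omega)]
      simp

-- ===== VERDICT (by name: the statement is the Claim_ definition above) =====
theorem find_max_coordinates_spec : Claim_equal_find_max_coordinates := by
  intro image x y window_size _ _
  exact pv_ports_eq image x y window_size
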